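-- pv_equiv track=rewrite | github.com/neko0774/competitive | atcoder/agc/agc039/a/main.py | count
-- ===== SOURCE A (Python) =====
-- def count(S):
--     p = [[S[0], 1]]
--     for s in S[1:]:
--         if p[-1][0]==s:
--             p[-1][1] += 1
--         else:
--             p.append([s, 1])
--     ret = 0
--     for pp,n in p:
--         ret += n//2
--     return ret
-- ===== SOURCE B (Python) =====
-- def count(S):
--     ret = 0
--     i = 1
--     while i < len(S):
--         if S[i] == S[i-1]:
--             ret += 1
--             i += 2
--         else:
--             i += 1
--     return ret
-- ===== Notes on version B (the rewrite author's own statement) =====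
-- stated objective: simpler
-- what changed: B replaces A's run-length-encoding list plus second summation loop by a single greedy pairing pass that consumes two equal adjacent characters at a time.
import Mathlib
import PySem

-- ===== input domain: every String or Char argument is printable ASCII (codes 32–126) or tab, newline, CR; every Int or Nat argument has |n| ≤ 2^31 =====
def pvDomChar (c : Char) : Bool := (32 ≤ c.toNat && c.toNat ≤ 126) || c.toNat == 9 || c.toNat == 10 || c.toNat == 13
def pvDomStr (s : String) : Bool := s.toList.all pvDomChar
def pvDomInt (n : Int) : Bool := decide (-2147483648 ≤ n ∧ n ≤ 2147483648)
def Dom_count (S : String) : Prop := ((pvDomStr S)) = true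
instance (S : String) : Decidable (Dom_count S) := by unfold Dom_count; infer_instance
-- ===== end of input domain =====

-- B replaces A's run-length-encoding list plus second summation loop by a single
-- greedy pairing pass that consumes two equal adjacent characters at a time.

-- ===== PORT A =====
-- A's run list p is kept most-recent-run first, so p[-1] access/update is the head.
def countStep (p : List (Char × Int)) (s : Char) : List (Char × Int) :=
  match p with
  | (c, n) :: t => if c = s then (c, n + 1) :: t else (s, 1) :: (c, n) :: t
  | [] => [(s, 1)]

def count (S : String) : Int :=
  match S.toList with
  | [] => 0  -- unreachable under Pre_count (Python raises IndexError on S[0])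
  | c :: rest =>
    let p := rest.foldl countStep [(c, 1)]
    p.foldl (fun ret pr => ret + PySem.Int.floordiv pr.2 2) 0

-- ===== PORT B =====
-- the while loop with index i: compare S[i] with S[i-1], skip 2 on a pair, else 1
def altGo : List Char → Int
  | a :: b :: rest => if a = b then 1 + altGo rest else altGo (b :: rest)
  | _ => 0

def count_alt (S : String) : Int := altGo S.toList

-- ===== PRECONDITION & SPEC =====
-- Pre_ excludes only the empty string, where A raises IndexError reading S[0].
def Pre_count (S : String) : Prop := S ≠ ""
instance (S : String) : Decidable (Pre_count S) := by unfold Pre_count; infer_instance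
def pvWitness_count : String := "aab"

def Spec_count (S : String) (out : Int) : Prop := out = count_alt S
instance (S : String) (out : Int) : Decidable (Spec_count S out) := by unfold Spec_count; infer_instance

-- ===== CLAIM (what is proved, stated in full; the proofs are below) =====
def Claim_equal_count : Prop := ∀ (S : String), Dom_count S → Pre_count S → Spec_count S (count S)

-- ===== LEMMAS AND PROOFS =====

-- canonical run-summing function: current run char c with count n, remaining chars l
def runG (c : Char) (n : Int) : List Char → Int
  | [] => PySem.Int.floordiv n 2
  | s :: l' => if c = s then runG c (n + 1) l' else PySem.Int.floordiv n 2 + runG s 1 l'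

def sumF (p : List (Char × Int)) : Int := (p.map (fun pr => PySem.Int.floordiv pr.2 2)).sum

theorem foldl_sumF (p : List (Char × Int)) (a : Int) :
    p.foldl (fun ret pr => ret + PySem.Int.floordiv pr.2 2) a = a + sumF p := by
  induction p generalizing a with
  | nil => simp [sumF]
  | cons x t ih =>
    simp only [List.foldl, ih, sumF, List.map_cons, List.sum_cons]
    ring

theorem sumF_foldl_step (l : List Char) (c : Char) (n : Int) (t : List (Char × Int)) :
    sumF (l.foldl countStep ((c, n) :: t)) = runG c n l + sumF t := by
  induction l generalizing c n t with
  | nil => simp [sumF, runG]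
  | cons s l' ih =>
    by_cases h : c = s
    · simp [List.foldl, countStep, h, ih, runG]
    · simp only [List.foldl, countStep, if_neg h, runG, ih]
      simp [sumF]; ring

theorem fd_two (n : Int) :
    PySem.Int.floordiv (n + 1) 2 = PySem.Int.floordiv n 2 + (if n % 2 = 1 then 1 else 0) := by
  rw [PySem.Int.floordiv_eq_ediv_of_pos (by omega), PySem.Int.floordiv_eq_ediv_of_pos (by omega)]
  split <;> omega

theorem runG_altGo (l : List Char) (c : Char) (n : Int) (hn : 1 ≤ n) :
    runG c n l = PySem.Int.floordiv n 2 + (if n % 2 = 1 then altGo (c :: l) else altGo l) := by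
  induction l generalizing c n with
  | nil => simp [runG, altGo]
  | cons s l' ih =>
    by_cases h : c = s
    · subst h
      rw [runG, if_pos rfl, ih c (n + 1) (by omega), fd_two n]
      by_cases hp : n % 2 = 1
      · have hp2 : ¬((n + 1) % 2 = 1) := by omega
        simp [hp, hp2, altGo]
        ring
      · have hp2 : (n + 1) % 2 = 1 := by omega
        simp [hp, hp2]
    · rw [runG, if_neg h, ih s 1 (by omega)]
      have h1 : (1 : Int) % 2 = 1 := by decide
      simp only [h1]
      by_cases hp : n % 2 = 1
      · simp [hp, altGo, h]
      · simp [hp]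

theorem count_eq_altGo (c : Char) (rest : List Char) :
    (rest.foldl countStep [(c, 1)]).foldl (fun ret pr => ret + PySem.Int.floordiv pr.2 2) 0
    = altGo (c :: rest) := by
    rw [foldl_sumF]
    have : ([(c, (1 : Int))] : List (Char × Int)) = (c, (1:Int)) :: [] := rfl
    rw [this, sumF_foldl_step, runG_altGo rest c 1 (by omega)]
    have h1 : PySem.Int.floordiv 1 2 = 0 := by decide
    have h2 : ((1:Int)) % 2 = 1 := by decide
    simp [sumF]

-- ===== VERDICT (by name: the statement is the Claim_ definition above) =====
theorem count_spec : Claim_equal_count := by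
  intro S _ hpre
  unfold Spec_count count count_alt
  cases hcase : S.toList with
  | nil =>
    exact absurd (String.toList_inj.mp (by simpa using hcase)) hpre
  | cons c rest =>
    simpa using count_eq_altGo c rest
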